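-- pv_equiv track=rewrite | github.com/ARE2020-G8G9/structsbatecrio | src/Code.py | nb_entites
-- ===== SOURCE A (Python) =====
-- def nb_entites(boite):
--     """
--         boite -> dict[str : int]
--
--         renvoie sous forme de dictionnaire le nombre de bactéries 1 et 2, de cases vides, de nourritures,
--         et d'antibiotique dans la boite lors de la i_ème itération.
--     """
--     res = {"Vide" : 0, "Nourriture" : 0, "Antibio" : 0, "Bacterie1" : 0, "Bacterie2" : 0}
--     for i in range(0, len(boite)):
--         for j in range(0, len(boite[0])):
--             contenu = boite[i][j]['contenu']
--             if contenu == 0: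
--                 res["Vide"]+=1
--             if contenu == 1:
--                 res["Nourriture"]+=1
--             if contenu == 2:
--                 res["Antibio"]+=1
--             if contenu == 3:
--                 res["Bacterie1"]+=1
--             if contenu == 4:
--                 res["Bacterie2"]+=1
--     return res
-- ===== SOURCE B (Python) =====
-- def nb_entites(boite):
--     # Flatten all cell contents once, then read the five counts straight off with list.count.
--     cells = [row[j]['contenu'] for row in boite for j in range(len(boite[0]))]
--     return {"Vide": cells.count(0), "Nourriture": cells.count(1), "Antibio": cells.count(2),
--             "Bacterie1": cells.count(3), "Bacterie2": cells.count(4)}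
-- ===== Notes on version B (the rewrite author's own statement) =====
-- stated objective: simpler
-- what changed: B flattens all cell contents into one list and reads the five counts off with list.count per label, instead of A's five accumulators updated through a per-cell chain of if-branches.
import Mathlib
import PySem

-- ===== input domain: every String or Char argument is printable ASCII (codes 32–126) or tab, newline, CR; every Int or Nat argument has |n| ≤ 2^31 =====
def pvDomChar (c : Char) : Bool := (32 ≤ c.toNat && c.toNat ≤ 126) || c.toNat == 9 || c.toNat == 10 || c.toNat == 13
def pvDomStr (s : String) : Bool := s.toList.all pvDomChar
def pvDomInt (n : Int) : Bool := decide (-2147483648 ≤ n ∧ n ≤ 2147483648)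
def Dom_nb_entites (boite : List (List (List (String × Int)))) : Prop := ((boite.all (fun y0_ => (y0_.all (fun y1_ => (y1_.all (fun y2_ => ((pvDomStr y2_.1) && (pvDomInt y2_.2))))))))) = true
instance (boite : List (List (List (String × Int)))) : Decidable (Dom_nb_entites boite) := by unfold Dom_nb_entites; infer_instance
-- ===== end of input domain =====

-- B replaces the five accumulators and per-cell branch chain with one flattened list of cell
-- contents read off by list.count per label (objective: simpler).

-- ===== PORT A =====
-- per-cell update: the five independent 'if contenu == k: res[key] += 1' statements
def pvStep_nb_entites (res : PySem.Dict String Int) (contenu : Int) : PySem.Dict String Int :=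
  let res := if contenu == 0 then res.modify "Vide" 0 (· + 1) else res
  let res := if contenu == 1 then res.modify "Nourriture" 0 (· + 1) else res
  let res := if contenu == 2 then res.modify "Antibio" 0 (· + 1) else res
  let res := if contenu == 3 then res.modify "Bacterie1" 0 (· + 1) else res
  let res := if contenu == 4 then res.modify "Bacterie2" 0 (· + 1) else res
  res

def nb_entites (boite : List (List (List (String × Int)))) : List (String × Int) :=
  let res : PySem.Dict String Int :=
    PySem.Dict.mk [("Vide", 0), ("Nourriture", 0), ("Antibio", 0), ("Bacterie1", 0), ("Bacterie2", 0)]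
  let res :=
    (PySem.List.pyRange 0 (PySem.List.len boite) 1).foldl (fun res i =>
      (PySem.List.pyRange 0 (PySem.List.len (PySem.List.pyGetD boite 0 [])) 1).foldl (fun res j =>
        let contenu := (PySem.Dict.mk (PySem.List.pyGetD (PySem.List.pyGetD boite i []) j [])).getD "contenu" 0
        pvStep_nb_entites res contenu) res) res
  res.items

-- ===== PORT B =====
def nb_entites_alt (boite : List (List (List (String × Int)))) : List (String × Int) :=
  let cells : List Int :=
    boite.flatMap (fun row =>
      (PySem.List.pyRange 0 (PySem.List.len (boite.headD [])) 1).map (fun j =>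
        (PySem.Dict.mk (PySem.List.pyGetD row j [])).getD "contenu" 0))
  [("Vide", (PySem.List.count cells 0 : Int)), ("Nourriture", (PySem.List.count cells 1 : Int)),
   ("Antibio", (PySem.List.count cells 2 : Int)), ("Bacterie1", (PySem.List.count cells 3 : Int)),
   ("Bacterie2", (PySem.List.count cells 4 : Int))]

-- ===== PRECONDITION & SPEC =====
-- Pre_ excludes exactly the inputs where A raises: a row shorter than the first row
-- (IndexError on boite[i][j]) or an accessed cell without the key 'contenu' (KeyError).
def Pre_nb_entites (boite : List (List (List (String × Int)))) : Prop :=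
  ∀ row ∈ boite, (boite.headD []).length ≤ row.length ∧
    ∀ cell ∈ row.take (boite.headD []).length, "contenu" ∈ cell.map Prod.fst
instance (boite : List (List (List (String × Int)))) : Decidable (Pre_nb_entites boite) := by
  unfold Pre_nb_entites; infer_instance

def pvWitness_nb_entites : (List (List (List (String × Int)))) := [[[("contenu", 3)]]]

def Spec_nb_entites (boite : List (List (List (String × Int)))) (out : List (String × Int)) : Prop := out = nb_entites_alt boite
instance (boite : List (List (List (String × Int)))) (out : List (String × Int)) : Decidable (Spec_nb_entites boite out) := by unfold Spec_nb_entites; infer_instance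

-- ===== CLAIM (what is proved, stated in full; the proofs are below) =====
def Claim_equal_nb_entites : Prop := ∀ (boite : List (List (List (String × Int)))), Dom_nb_entites boite → Pre_nb_entites boite → Spec_nb_entites boite (nb_entites boite)

-- ===== LEMMAS AND PROOFS =====

-- one step on the five-key literal dict, written as a literal again
theorem pvStep_lit (v a b c d e : Int) :
    pvStep_nb_entites (PySem.Dict.mk [("Vide", a), ("Nourriture", b), ("Antibio", c), ("Bacterie1", d), ("Bacterie2", e)]) v =
    PySem.Dict.mk [("Vide", a + if v == 0 then 1 else 0), ("Nourriture", b + if v == 1 then 1 else 0),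
      ("Antibio", c + if v == 2 then 1 else 0), ("Bacterie1", d + if v == 3 then 1 else 0),
      ("Bacterie2", e + if v == 4 then 1 else 0)] := by
  simp [pvStep_nb_entites, PySem.Dict.modify]
  split_ifs <;> simp_all [PySem.Dict.insert, PySem.Dict.getD, PySem.Dict.get?, PySem.Dict.contains]

-- folding the step over any list of contents just adds the five counts
theorem pvFold_counts (vs : List Int) (a b c d e : Int) :
    vs.foldl pvStep_nb_entites
      (PySem.Dict.mk [("Vide", a), ("Nourriture", b), ("Antibio", c), ("Bacterie1", d), ("Bacterie2", e)]) =
    PySem.Dict.mk [("Vide", a + vs.count 0), ("Nourriture", b + vs.count 1), ("Antibio", c + vs.count 2),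
      ("Bacterie1", d + vs.count 3), ("Bacterie2", e + vs.count 4)] := by
  induction vs generalizing a b c d e with
  | nil => simp
  | cons v vs ih =>
    rw [List.foldl_cons, pvStep_lit, ih]
    simp only [List.count_cons]
    refine congrArg _ ?_
    push_cast
    split_ifs <;> simp_all <;> ring

-- 'for j in range(w): f(row[j])' over a row at least w long visits exactly row.take w
theorem pvMap_pyGetD_range_take {α : Type} (row : List α) (w : Nat) (h : w ≤ row.length) (d : α) :
    (PySem.List.pyRange 0 (w : Int) 1).map (fun j => PySem.List.pyGetD row j d) = row.take w := by
  induction w with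
  | zero => simp
  | succ n ih =>
    have h1 : ((n : Int) + 1) = ((n + 1 : Nat) : Int) := by push_cast; ring
    rw [← h1, PySem.List.pyRange_one_succ_right (by positivity), List.map_append,
      ih (by omega)]
    have hn : n < row.length := by omega
    rw [List.take_add_one]
    simp [PySem.List.pyGetD_natCast, List.getElem?_eq_getElem hn, List.getD_eq_getElem?_getD]

-- ===== VERDICT (by name: the statement is the Claim_ definition above) =====
theorem nb_entites_spec : Claim_equal_nb_entites := by
  intro boite _ hpre
  unfold Spec_nb_entites nb_entites nb_entites_alt
  simp only [PySem.List.len_eq]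
  set w : Nat := (boite.headD []).length with hw
  have hhead : PySem.List.pyGetD boite 0 [] = boite.headD [] := by
    cases boite <;> simp [PySem.List.pyGetD, PySem.List.pyIdx?, PySem.List.pyGet?]
  rw [hhead, ← hw]
  set extract : List (String × Int) → Int := fun cell => (PySem.Dict.mk cell).getD "contenu" 0 with hex
  set F : List (List (String × Int)) → List Int := fun row => (row.take w).map extract with hF
  -- each inner 'for j in range(w)' pass over a row ∈ boite visits exactly row.take w
  have hrow : ∀ row ∈ boite,
      (PySem.List.pyRange 0 (w : Int) 1).map (fun j => extract (PySem.List.pyGetD row j [])) = F row := by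
    intro row hr
    rw [hF]
    beta_reduce
    rw [← pvMap_pyGetD_range_take row w (hpre row hr).1 [], List.map_map]
    rfl
  set init : PySem.Dict String Int :=
    PySem.Dict.mk [("Vide", 0), ("Nourriture", 0), ("Antibio", 0), ("Bacterie1", 0), ("Bacterie2", 0)] with hinit
  -- A: outer range-loop = fold over rows, inner loop = fold over F row, all = one fold over the flattening
  have hAeq : List.foldl (fun res i =>
        List.foldl (fun res j => pvStep_nb_entites res (extract (PySem.List.pyGetD (PySem.List.pyGetD boite i []) j [])))
          res (PySem.List.pyRange 0 (w : Int) 1)) init (PySem.List.pyRange 0 (boite.length : Int) 1)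
      = List.foldl pvStep_nb_entites init (boite.flatMap F) := by
    rw [PySem.List.foldl_pyRange_zero_pyGetD' boite []
      (fun res row => List.foldl (fun res j => pvStep_nb_entites res (extract (PySem.List.pyGetD row j [])))
        res (PySem.List.pyRange 0 (w : Int) 1)) init]
    rw [PySem.List.foldl_congr_mem boite _ (fun res row => List.foldl pvStep_nb_entites res (F row)) init
      (by
        intro acc row hr
        beta_reduce
        rw [← hrow row hr, ← List.foldl_map])]
    rw [List.flatMap, List.foldl_flatten, List.foldl_map]
  -- B: its cells list is the same flattening
  have hBeq : boite.flatMap (fun row =>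
        (PySem.List.pyRange 0 (w : Int) 1).map (fun j => extract (PySem.List.pyGetD row j [])))
      = boite.flatMap F := List.flatMap_congr hrow
  rw [hAeq, hBeq, pvFold_counts]
  simp [PySem.List.count_eq]
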